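-- pv_equiv track=rewrite | github.com/Disentangled-Tech/SignalForge | app/services/ore/dominant_dimension.py | get_dominant_trs_dimension
-- ===== SOURCE A (Python) =====
-- _DIMENSION_ORDER = ("momentum", "complexity", "pressure", "leadership_gap")
--
-- def get_dominant_trs_dimension(
--     momentum: int,
--     complexity: int,
--     pressure: int,
--     leadership_gap: int,
-- ) -> str:
--     """Return the TRS dimension with the highest score.
--
--     Args:
--         momentum: Momentum dimension score (0–100).
--         complexity: Complexity dimension score (0–100).
--         pressure: Pressure dimension score (0–100).
--         leadership_gap: Leadership gap dimension score (0–100).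
--
--     Returns:
--         One of "momentum", "complexity", "pressure", "leadership_gap".
--         Tie-break order: momentum > complexity > pressure > leadership_gap.
--     """
--     scores = {
--         "momentum": momentum,
--         "complexity": complexity,
--         "pressure": pressure,
--         "leadership_gap": leadership_gap,
--     }
--     max_score = max(scores.values())
--     for dim in _DIMENSION_ORDER:
--         if scores[dim] == max_score:
--             return dim
--     return _DIMENSION_ORDER[0]  # fallback (all equal)
-- ===== SOURCE B (Python) =====
-- def get_dominant_trs_dimension(momentum, complexity, pressure, leadership_gap):
--     best_dim, best_score = "momentum", momentum
--     for dim, score in (("complexity", complexity),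
--                        ("pressure", pressure),
--                        ("leadership_gap", leadership_gap)):
--         if score > best_score:
--             best_dim, best_score = dim, score
--     return best_dim
-- ===== Notes on version B (the rewrite author's own statement) =====
-- stated objective: simpler
-- what changed: Replaces the dict + separate max() pass + lookup loop with a single linear scan that keeps the best (dimension, score) pair, updating only on a strictly greater score to preserve the first-seen tie-break.
import Mathlib
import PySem

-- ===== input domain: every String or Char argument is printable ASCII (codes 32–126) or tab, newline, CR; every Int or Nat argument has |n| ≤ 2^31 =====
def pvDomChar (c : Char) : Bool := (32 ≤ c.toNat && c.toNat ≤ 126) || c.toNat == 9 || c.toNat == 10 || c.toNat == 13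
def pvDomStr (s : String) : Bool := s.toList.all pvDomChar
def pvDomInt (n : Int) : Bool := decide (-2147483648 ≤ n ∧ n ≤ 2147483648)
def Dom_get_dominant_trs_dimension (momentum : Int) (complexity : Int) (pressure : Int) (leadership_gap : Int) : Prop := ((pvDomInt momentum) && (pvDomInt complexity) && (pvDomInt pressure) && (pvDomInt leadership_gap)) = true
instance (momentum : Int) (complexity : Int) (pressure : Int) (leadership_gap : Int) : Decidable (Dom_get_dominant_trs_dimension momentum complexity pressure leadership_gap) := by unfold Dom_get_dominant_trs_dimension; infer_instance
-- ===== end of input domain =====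

-- B replaces A's dict + separate max() pass with a single strict-> linear scan keeping the best (dimension, score) pair; objective: simpler.


-- ===== PORT A =====
-- Port of A: dict of scores, max over values, then first dimension equal to the max.
def get_dominant_trs_dimension (momentum : Int) (complexity : Int) (pressure : Int) (leadership_gap : Int) : String :=
  let scores : PySem.Dict String Int :=
    PySem.Dict.ofList [("momentum", momentum), ("complexity", complexity), ("pressure", pressure), ("leadership_gap", leadership_gap)]
  let max_score := max (max (max momentum complexity) pressure) leadership_gap
  if PySem.Dict.getD scores "momentum" 0 = max_score then "momentum"
  else if PySem.Dict.getD scores "complexity" 0 = max_score then "complexity"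
  else if PySem.Dict.getD scores "pressure" 0 = max_score then "pressure"
  else if PySem.Dict.getD scores "leadership_gap" 0 = max_score then "leadership_gap"
  else "momentum"

-- ===== PORT B =====
-- Port of B: one fold over the remaining (dim, score) pairs, replacing the best only on strict >.
def get_dominant_trs_dimension_alt (momentum : Int) (complexity : Int) (pressure : Int) (leadership_gap : Int) : String :=
  (([("complexity", complexity), ("pressure", pressure), ("leadership_gap", leadership_gap)] : List (String × Int)).foldl
    (fun best pr => if pr.2 > best.2 then pr else best) ("momentum", momentum)).1

-- ===== PRECONDITION & SPEC =====
def Spec_get_dominant_trs_dimension (momentum : Int) (complexity : Int) (pressure : Int) (leadership_gap : Int) (out : String) : Prop := out = get_dominant_trs_dimension_alt momentum complexity pressure leadership_gap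
instance (momentum : Int) (complexity : Int) (pressure : Int) (leadership_gap : Int) (out : String) : Decidable (Spec_get_dominant_trs_dimension momentum complexity pressure leadership_gap out) := by unfold Spec_get_dominant_trs_dimension; infer_instance

-- ===== CLAIM (what is proved, stated in full; the proofs are below) =====
def Claim_equal_get_dominant_trs_dimension : Prop := ∀ (momentum : Int) (complexity : Int) (pressure : Int) (leadership_gap : Int), Dom_get_dominant_trs_dimension momentum complexity pressure leadership_gap → Spec_get_dominant_trs_dimension momentum complexity pressure leadership_gap (get_dominant_trs_dimension momentum complexity pressure leadership_gap)

-- ===== LEMMAS AND PROOFS =====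

-- ===== VERDICT (by name: the statement is the Claim_ definition above) =====
theorem get_dominant_trs_dimension_spec : Claim_equal_get_dominant_trs_dimension := by
  intro m c p l _
  unfold Spec_get_dominant_trs_dimension get_dominant_trs_dimension get_dominant_trs_dimension_alt
  have e1 : PySem.Dict.getD (PySem.Dict.ofList [("momentum", m), ("complexity", c), ("pressure", p), ("leadership_gap", l)]) "momentum" 0 = m := rfl
  have e2 : PySem.Dict.getD (PySem.Dict.ofList [("momentum", m), ("complexity", c), ("pressure", p), ("leadership_gap", l)]) "complexity" 0 = c := rfl
  have e3 : PySem.Dict.getD (PySem.Dict.ofList [("momentum", m), ("complexity", c), ("pressure", p), ("leadership_gap", l)]) "pressure" 0 = p := rfl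
  have e4 : PySem.Dict.getD (PySem.Dict.ofList [("momentum", m), ("complexity", c), ("pressure", p), ("leadership_gap", l)]) "leadership_gap" 0 = l := rfl
  simp only [List.foldl, e1, e2, e3, e4, max_def]
  split_ifs <;> try rfl
  all_goals omega
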